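-- pv_equiv track=rewrite | github.com/admin-kazuto/cawl-data | routes/content_write.py | _is_junk
-- ===== SOURCE A (Python) =====
-- def _is_junk(text: str) -> bool:
--     """Lọc rác: navigation, contact, legal, quảng cáo..."""
--     if len(text) < 20:
--         return True
--     text_lower = text.lower()
--     junk_keywords = [
--         # Navigation / UI
--         "đăng nhập", "đăng ký", "trang chủ", "giỏ hàng", "xem thêm",
--         "home", "login", "register", "cart", "click here", "read more",
--         "menu", "search", "tìm kiếm",
--         # Contact
--         "hotline", "zalo:", "tel:", "email:", "@gmail", "@yahoo",
--         # Legal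
--         "bản quyền", "copyright ©", "all rights reserved", "privacy policy",
--         "điều khoản", "terms of",
--         # Social
--         "follow us", "subscribe", "theo dõi chúng tôi",
--         # Ads
--         "khuyến mãi", "sale off", "giảm giá đến",
--     ]
--     return any(kw in text_lower for kw in junk_keywords)
-- ===== SOURCE B (Python) =====
-- def _is_junk(text: str) -> bool:
--     """Lọc rác: navigation, contact, legal, quảng cáo..."""
--     if len(text) < 20:
--         return True
--     t = text.lower()
--     junk_keywords = [
--         "đăng nhập", "đăng ký", "trang chủ", "giỏ hàng", "xem thêm",
--         "home", "login", "register", "cart", "click here", "read more",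
--         "menu", "search", "tìm kiếm",
--         "hotline", "zalo:", "tel:", "email:", "@gmail", "@yahoo",
--         "bản quyền", "copyright ©", "all rights reserved", "privacy policy",
--         "điều khoản", "terms of",
--         "follow us", "subscribe", "theo dõi chúng tôi",
--         "khuyến mãi", "sale off", "giảm giá đến",
--     ]
--     # Index the keywords by their first character, then make one left-to-right
--     # scan of the text: at each position only the keywords that could start
--     # there (same first character) are tested.
--     by_first = {}
--     for kw in junk_keywords:
--         by_first[kw[0]] = by_first.get(kw[0], []) + [kw]
--     for i in range(len(t)):
--         for kw in by_first.get(t[i], []):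
--             if t.startswith(kw, i):
--                 return True
--     return False
-- ===== Notes on version B (the rewrite author's own statement) =====
-- stated objective: alternative
-- what changed: A loops over the keyword list, running a full substring search of the text for each keyword; B builds a dict indexing keywords by first character and makes a single left-to-right scan of the text, testing at each position only the keywords whose first character matches.
import Mathlib
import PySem

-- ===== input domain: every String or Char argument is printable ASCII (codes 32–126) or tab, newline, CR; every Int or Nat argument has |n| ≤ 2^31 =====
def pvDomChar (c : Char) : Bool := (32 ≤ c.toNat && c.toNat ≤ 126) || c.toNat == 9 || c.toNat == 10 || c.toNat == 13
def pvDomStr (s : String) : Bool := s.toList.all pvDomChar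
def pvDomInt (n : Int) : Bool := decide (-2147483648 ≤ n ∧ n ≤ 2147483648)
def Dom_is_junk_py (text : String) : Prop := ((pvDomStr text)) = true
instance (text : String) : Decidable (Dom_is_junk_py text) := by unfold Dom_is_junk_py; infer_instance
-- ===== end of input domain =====

-- B replaces A's per-keyword substring scans by one left-to-right scan of the text with
-- the keywords indexed by first character (alternative; equal return values proved below).

-- ===== PORT A =====
def is_junk_py (text : String) : Bool :=
  if PySem.Str.len text < 20 then true
  else
    let text_lower := PySem.Str.lower text
    let junk_keywords : List String := [
      "đăng nhập", "đăng ký", "trang chủ", "giỏ hàng", "xem thêm",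
      "home", "login", "register", "cart", "click here", "read more",
      "menu", "search", "tìm kiếm",
      "hotline", "zalo:", "tel:", "email:", "@gmail", "@yahoo",
      "bản quyền", "copyright ©", "all rights reserved", "privacy policy",
      "điều khoản", "terms of",
      "follow us", "subscribe", "theo dõi chúng tôi",
      "khuyến mãi", "sale off", "giảm giá đến"]
    junk_keywords.any (fun kw => PySem.Str.isIn kw text_lower)

-- ===== PORT B =====
def pvJunkKeywordsAlt : List (List Char) :=
  [("đăng nhập" : String).toList, ("đăng ký" : String).toList, ("trang chủ" : String).toList,
   ("giỏ hàng" : String).toList, ("xem thêm" : String).toList,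
   ("home" : String).toList, ("login" : String).toList, ("register" : String).toList,
   ("cart" : String).toList, ("click here" : String).toList, ("read more" : String).toList,
   ("menu" : String).toList, ("search" : String).toList, ("tìm kiếm" : String).toList,
   ("hotline" : String).toList, ("zalo:" : String).toList, ("tel:" : String).toList,
   ("email:" : String).toList, ("@gmail" : String).toList, ("@yahoo" : String).toList,
   ("bản quyền" : String).toList, ("copyright ©" : String).toList,
   ("all rights reserved" : String).toList, ("privacy policy" : String).toList,
   ("điều khoản" : String).toList, ("terms of" : String).toList,
   ("follow us" : String).toList, ("subscribe" : String).toList,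
   ("theo dõi chúng tôi" : String).toList,
   ("khuyến mãi" : String).toList, ("sale off" : String).toList,
   ("giảm giá đến" : String).toList]

-- Source B's "for kw in junk_keywords: by_first[kw[0]] = by_first.get(kw[0], []) + [kw]"
-- (kw[0] ported as kw.headI: exact here, every keyword of the literal list is nonempty)
def pvBuildIndex (kws : List (List Char)) : PySem.Dict Char (List (List Char)) :=
  kws.foldl (fun d kw => d.insert kw.headI (d.getD kw.headI [] ++ [kw])) PySem.Dict.empty

-- Source B's "for i in range(len(t)): for kw in by_first.get(t[i], []): if t.startswith(kw, i)"
-- as structural recursion on the suffix t[i:]; t.startswith(kw, i) is exactly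
-- PySem.Chars.startswith on that suffix for 0 ≤ i < len(t)
def pvScan (d : PySem.Dict Char (List (List Char))) : List Char → Bool
  | [] => false
  | c :: rest =>
      if (d.getD c []).any (fun kw => PySem.Chars.startswith (c :: rest) kw) then true
      else pvScan d rest

def is_junk_py_alt (text : String) : Bool :=
  if PySem.Str.len text < 20 then true
  else pvScan (pvBuildIndex pvJunkKeywordsAlt) (PySem.Chars.lower text.toList)

-- ===== PRECONDITION & SPEC =====
def Spec_is_junk_py (text : String) (out : Bool) : Prop := out = is_junk_py_alt text
instance (text : String) (out : Bool) : Decidable (Spec_is_junk_py text out) := by unfold Spec_is_junk_py; infer_instance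

-- ===== CLAIM (what is proved, stated in full; the proofs are below) =====
def Claim_equal_is_junk_py : Prop := ∀ (text : String), Dom_is_junk_py text → Spec_is_junk_py text (is_junk_py text)

-- ===== LEMMAS AND PROOFS =====

-- any over a list is determined pointwise (exact?/simp? find no Mathlib lemma of this shape)
theorem pv_any_pointwise {α : Type} (l : List α) (f g : α → Bool)
    (h : ∀ a ∈ l, f a = g a) : l.any f = l.any g := by
  induction l with
  | nil => rfl
  | cons a l ih =>
      simp only [List.any_cons]
      rw [h a (List.mem_cons_self), ih (fun b hb => h b (List.mem_cons_of_mem a hb))]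

-- the first-character index returns exactly the keywords whose first character is c, in order
theorem pv_build_getD_aux (l : List (List Char)) (c : Char) :
    ∀ d : PySem.Dict Char (List (List Char)),
      (l.foldl (fun d kw => d.insert kw.headI (d.getD kw.headI [] ++ [kw])) d).getD c []
        = d.getD c [] ++ l.filter (fun kw => kw.headI == c) := by
  induction l with
  | nil => intro d; simp
  | cons kw l ih =>
      intro d
      rw [List.foldl_cons, ih, List.filter_cons]
      by_cases hc : kw.headI = c
      · simp [hc]
      · simp [PySem.Dict.getD_insert, hc, Ne.symm hc]

theorem pv_build_getD (kws : List (List Char)) (c : Char) :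
    (pvBuildIndex kws).getD c [] = kws.filter (fun kw => kw.headI == c) := by
  rw [pvBuildIndex, pv_build_getD_aux]
  simp

-- a keyword that starts at this position begins with this position's character
theorem pv_sw_head (kw : List Char) (c : Char) (rest : List Char) (hkw : kw ≠ [])
    (h : PySem.Chars.startswith (c :: rest) kw = true) : kw.headI = c := by
  have hp := (PySem.Chars.startswith_iff _ _).mp h
  match kw, hkw with
  | k0 :: ks, _ =>
      obtain ⟨t, ht⟩ := hp
      simp only [List.cons_append] at ht
      simp [List.headI, (List.cons.injEq _ _ _ _).mp ht |>.1]

-- 'kw in (c :: rest)' decomposes into 'starts here' or 'kw in rest'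
theorem pv_isIn_cons (kw : List Char) (c : Char) (rest : List Char) :
    PySem.Chars.isIn kw (c :: rest)
      = (PySem.Chars.startswith (c :: rest) kw || PySem.Chars.isIn kw rest) := by
  rcases h : PySem.Chars.isIn kw (c :: rest) with _ | _
  · rw [PySem.Chars.isIn_eq_false_iff] at h
    have h1 : PySem.Chars.startswith (c :: rest) kw = false := by
      rcases h2 : PySem.Chars.startswith (c :: rest) kw with _ | _
      · rfl
      · exact absurd ((List.infix_cons_iff).mpr (Or.inl ((PySem.Chars.startswith_iff _ _).mp h2))) h
    have h2 : PySem.Chars.isIn kw rest = false := by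
      rcases h3 : PySem.Chars.isIn kw rest with _ | _
      · rfl
      · exact absurd ((List.infix_cons_iff).mpr
          (Or.inr ((PySem.Chars.isIn_iff_infix _ _).mp h3))) h
    simp [h1, h2]
  · rw [PySem.Chars.isIn_iff_infix] at h
    rcases (List.infix_cons_iff).mp h with hp | hi
    · simp [(PySem.Chars.startswith_iff _ _).mpr hp]
    · simp [(PySem.Chars.isIn_iff_infix _ _).mpr hi]

theorem pv_isIn_nil (kw : List Char) (hkw : kw ≠ []) :
    PySem.Chars.isIn kw [] = false := by
  rw [PySem.Chars.isIn_eq_false_iff]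
  intro h
  exact hkw (List.eq_nil_of_infix_nil h)

-- at one position, testing only the keywords indexed under this character tests them all
theorem pv_indexed_any (kws : List (List Char)) (hkw : ∀ kw ∈ kws, kw ≠ [])
    (c : Char) (rest : List Char) :
    ((pvBuildIndex kws).getD c []).any (fun kw => PySem.Chars.startswith (c :: rest) kw)
      = kws.any (fun kw => PySem.Chars.startswith (c :: rest) kw) := by
  rw [pv_build_getD, List.any_filter]
  apply pv_any_pointwise
  intro kw hmem
  rcases hsw : PySem.Chars.startswith (c :: rest) kw with _ | _
  · simp
  · simp [pv_sw_head kw c rest (hkw kw hmem) hsw]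

-- the indexed left-to-right scan computes exactly 'some keyword occurs in s'
theorem pv_scan_eq (kws : List (List Char)) (hkw : ∀ kw ∈ kws, kw ≠ []) :
    ∀ s : List Char, kws.any (fun kw => PySem.Chars.isIn kw s) = pvScan (pvBuildIndex kws) s := by
  intro s
  induction s with
  | nil =>
      rw [show pvScan (pvBuildIndex kws) [] = false from rfl, List.any_eq_false]
      intro kw hmem
      simp [pv_isIn_nil kw (hkw kw hmem)]
  | cons c rest ih =>
      have hstep : pvScan (pvBuildIndex kws) (c :: rest)
          = if kws.any (fun kw => PySem.Chars.startswith (c :: rest) kw) then true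
            else pvScan (pvBuildIndex kws) rest := by
        rw [show pvScan (pvBuildIndex kws) (c :: rest)
              = if ((pvBuildIndex kws).getD c []).any (fun kw => PySem.Chars.startswith (c :: rest) kw)
                then true else pvScan (pvBuildIndex kws) rest from rfl,
            pv_indexed_any kws hkw c rest]
      rcases h : kws.any (fun kw => PySem.Chars.startswith (c :: rest) kw) with _ | _
      · rw [hstep]
        simp only [h, Bool.false_eq_true, if_false]
        rw [← ih]
        rw [List.any_eq_false] at h
        apply pv_any_pointwise
        intro kw hmem
        rw [pv_isIn_cons]
        simp [h kw hmem]
      · rw [hstep]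
        simp only [h, if_true]
        rw [List.any_eq_true] at h ⊢
        obtain ⟨kw, hmem, hsw⟩ := h
        exact ⟨kw, hmem, by rw [pv_isIn_cons]; simp [hsw]⟩

theorem pv_keywords_nonempty : ∀ kw ∈ pvJunkKeywordsAlt, kw ≠ [] := by decide

-- ===== VERDICT (by name: the statement is the Claim_ definition above) =====
theorem is_junk_py_spec : Claim_equal_is_junk_py := by
  intro text _
  unfold Spec_is_junk_py is_junk_py is_junk_py_alt
  split_ifs with h
  · rfl
  · rw [← pv_scan_eq pvJunkKeywordsAlt pv_keywords_nonempty]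
    simp [pvJunkKeywordsAlt, PySem.Str.isIn, PySem.Str.lower]
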